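-- pv_equiv track=rewrite | github.com/storm-fsv-cvut/smoderp2d | smoderp2d/providers/base.py | _comp_type
-- ===== SOURCE A (Python) =====
-- def _comp_type(tc):
--     """Returns boolean information about the components of the computation.
--
--     Return 4 true/values for rill, subflow, stream, diffuse
--     presence/non-presence.
--
--     :param str tc: type of computation
--
--     :return dict:
--     """
--     ret = {}
--     for item in ('diffuse',
--                  'subflow',
--                  'stream',
--                  'rill',
--                  'only_surface'):
--         ret[item] = False
--
--     itc = int(tc)
--     if itc == 1:
--         ret['rill'] = True
--     elif itc == 3:
--         ret['stream'] = True
--         ret['rill'] = True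
--     elif itc == 4:
--         ret['subflow'] = True
--         ret['rill'] = True
--     elif itc == 5:
--         ret['stream'] = True
--         ret['subflow'] = True
--         ret['rill'] = True
--     elif itc == 0:
--         ret['only_surface'] = True
--
--     return ret
-- ===== SOURCE B (Python) =====
-- _MASKS = (('diffuse', 0),
--           ('subflow', 0b110000),
--           ('stream', 0b101000),
--           ('rill', 0b111010),
--           ('only_surface', 0b000001))
--
--
-- def _comp_type(tc):
--     """Returns boolean information about the components of the computation."""
--     itc = int(tc)
--     return {k: 0 <= itc <= 5 and (m >> itc) & 1 == 1 for k, m in _MASKS}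
-- ===== Notes on version B (the rewrite author's own statement) =====
-- stated objective: alternative
-- what changed: Replaces the init-all-False loop plus the five-branch if/elif mutation cascade with a per-flag bitmask table: each flag's set of activating codes is encoded as one integer, and the flag is computed by a guarded bit test (m >> itc) & 1 in a dict comprehension.
import Mathlib
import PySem

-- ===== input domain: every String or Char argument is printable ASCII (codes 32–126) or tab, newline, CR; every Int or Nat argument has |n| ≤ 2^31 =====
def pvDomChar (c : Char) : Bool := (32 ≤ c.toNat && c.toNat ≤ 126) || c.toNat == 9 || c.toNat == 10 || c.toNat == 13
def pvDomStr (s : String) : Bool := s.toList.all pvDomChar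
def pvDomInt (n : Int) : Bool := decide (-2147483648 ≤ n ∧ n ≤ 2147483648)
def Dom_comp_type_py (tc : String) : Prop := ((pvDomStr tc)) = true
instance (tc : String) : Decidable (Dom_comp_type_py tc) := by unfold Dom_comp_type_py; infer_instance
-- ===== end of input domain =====

-- B replaces the init-loop + if/elif mutation cascade with a bitmask table: each flag is a guarded bit test on int(tc) (alternative, same cost).


-- ===== PORT A =====
def comp_type_py (tc : String) : List (String × Bool) :=
  -- ret = {}; for item in (...): ret[item] = False
  let ret : PySem.Dict String Bool :=
    ["diffuse", "subflow", "stream", "rill", "only_surface"].foldl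
      (fun d item => d.insert item false) PySem.Dict.empty
  -- itc = int(tc)  (none = ValueError, excluded by Pre_)
  match PySem.Int.ofStr? tc with
  | none => []
  | some itc =>
    let ret :=
      if itc = 1 then ret.insert "rill" true
      else if itc = 3 then (ret.insert "stream" true).insert "rill" true
      else if itc = 4 then (ret.insert "subflow" true).insert "rill" true
      else if itc = 5 then ((ret.insert "stream" true).insert "subflow" true).insert "rill" true
      else if itc = 0 then ret.insert "only_surface" true
      else ret
    ret.items

-- ===== PORT B =====
-- masks are small Nat literals; Python's `(m >> itc) & 1 == 1` is only evaluated under the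
-- short-circuit guard 0 <= itc <= 5, so `itc.toNat` is exact wherever the bit test is reached.
def pvMasks : List (String × Nat) :=
  [("diffuse", 0), ("subflow", 48), ("stream", 40), ("rill", 58), ("only_surface", 1)]

def comp_type_py_alt (tc : String) : List (String × Bool) :=
  match PySem.Int.ofStr? tc with
  | none => []
  | some itc =>
    pvMasks.map (fun km =>
      (km.1, decide (0 ≤ itc ∧ itc ≤ 5) && ((km.2 >>> itc.toNat) % 2 == 1)))

-- ===== PRECONDITION & SPEC =====
-- Pre_ excludes exactly the strings on which int(tc) raises ValueError in A.
def Pre_comp_type_py (tc : String) : Prop := (PySem.Int.ofStr? tc).isSome = true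
instance (tc : String) : Decidable (Pre_comp_type_py tc) := by unfold Pre_comp_type_py; infer_instance
def pvWitness_comp_type_py : String := "1"

def Spec_comp_type_py (tc : String) (out : List (String × Bool)) : Prop := out = comp_type_py_alt tc
instance (tc : String) (out : List (String × Bool)) : Decidable (Spec_comp_type_py tc out) := by unfold Spec_comp_type_py; infer_instance

-- ===== CLAIM (what is proved, stated in full; the proofs are below) =====
def Claim_equal_comp_type_py : Prop := ∀ (tc : String), Dom_comp_type_py tc → Pre_comp_type_py tc → Spec_comp_type_py tc (comp_type_py tc)

-- ===== LEMMAS AND PROOFS =====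

-- Both sides depend on tc only through int(tc): pointwise equality for every itc.
theorem pv_core_eq (itc : Int) :
    (let ret : PySem.Dict String Bool :=
      ["diffuse", "subflow", "stream", "rill", "only_surface"].foldl
        (fun d item => d.insert item false) PySem.Dict.empty
     let ret :=
      if itc = 1 then ret.insert "rill" true
      else if itc = 3 then (ret.insert "stream" true).insert "rill" true
      else if itc = 4 then (ret.insert "subflow" true).insert "rill" true
      else if itc = 5 then ((ret.insert "stream" true).insert "subflow" true).insert "rill" true
      else if itc = 0 then ret.insert "only_surface" true
      else ret
     ret.items) =
    pvMasks.map (fun km =>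
      (km.1, decide (0 ≤ itc ∧ itc ≤ 5) && ((km.2 >>> itc.toNat) % 2 == 1))) := by
  by_cases h1 : itc = 1
  · subst h1; decide
  by_cases h3 : itc = 3
  · subst h3; decide
  by_cases h4 : itc = 4
  · subst h4; decide
  by_cases h5 : itc = 5
  · subst h5; decide
  by_cases h0 : itc = 0
  · subst h0; decide
  by_cases h2 : itc = 2
  · subst h2; decide
  · -- itc outside 0..5: the guard is false and the base dict has every flag False
    have hg : ¬(0 ≤ itc ∧ itc ≤ 5) := by omega
    simp [h1, h3, h4, h5, h0, pvMasks, hg]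
    decide

-- ===== VERDICT (by name: the statement is the Claim_ definition above) =====
theorem comp_type_py_spec : Claim_equal_comp_type_py := by
  intro tc _ hpre
  unfold Spec_comp_type_py comp_type_py comp_type_py_alt
  cases h : PySem.Int.ofStr? tc with
  | none => simp [Pre_comp_type_py, h] at hpre
  | some itc => exact pv_core_eq itc
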